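-- pv_equiv track=rewrite | github.com/adrian0398/Introytaller2018 | Código/Recursión de pila/cero.py | cero_aux
-- ===== SOURCE A (Python) =====
-- def cero_aux(lista):
--      if lista==[]:
--           return False
--      else:
--           if lista[0]==0:
--                return True
--           else:
--                return cero_aux(lista[1:])
-- ===== SOURCE B (Python) =====
-- def cero_aux(lista):
--     for x in lista:
--         if x == 0:
--             return True
--     return False
-- ===== Notes on version B (the rewrite author's own statement) =====
-- stated objective: faster
-- what changed: Replaced the head/tail recursion over lista[1:] (which copies the tail on every call, O(n^2) total, and hits the recursion limit) with a single flat iterative scan with early return.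
import Mathlib
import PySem

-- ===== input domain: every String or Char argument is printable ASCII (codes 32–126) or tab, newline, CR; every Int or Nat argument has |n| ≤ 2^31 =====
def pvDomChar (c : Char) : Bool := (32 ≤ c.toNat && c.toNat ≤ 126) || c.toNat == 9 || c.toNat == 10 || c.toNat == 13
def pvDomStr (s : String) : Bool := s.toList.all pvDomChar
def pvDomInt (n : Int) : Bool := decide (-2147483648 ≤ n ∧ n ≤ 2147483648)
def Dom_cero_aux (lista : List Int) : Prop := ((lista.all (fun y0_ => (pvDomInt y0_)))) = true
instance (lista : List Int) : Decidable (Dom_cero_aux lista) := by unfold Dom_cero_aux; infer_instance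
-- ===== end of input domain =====

-- B replaces A's recursion on lista[1:] with a single iterative scan (List.any): simpler/idiomatic.


-- ===== PORT A =====
def cero_aux : List Int → Bool
  | [] => false
  | x :: rest => if x == 0 then true else cero_aux rest

-- ===== PORT B =====
-- B: one flat scan with early return = List.any
def cero_aux_alt (lista : List Int) : Bool := lista.any (fun x => x == 0)

-- ===== PRECONDITION & SPEC =====
def Spec_cero_aux (lista : List Int) (out : Bool) : Prop := out = cero_aux_alt lista
instance (lista : List Int) (out : Bool) : Decidable (Spec_cero_aux lista out) := by unfold Spec_cero_aux; infer_instance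

-- ===== CLAIM (what is proved, stated in full; the proofs are below) =====
def Claim_equal_cero_aux : Prop := ∀ (lista : List Int), Dom_cero_aux lista → Spec_cero_aux lista (cero_aux lista)

-- ===== LEMMAS AND PROOFS =====

-- ===== VERDICT (by name: the statement is the Claim_ definition above) =====
theorem cero_aux_spec : Claim_equal_cero_aux := by
  intro lista h
  clear h
  unfold Spec_cero_aux cero_aux_alt
  induction lista with
  | nil => rfl
  | cons x rest ih =>
      simp only [cero_aux, List.any_cons]
      by_cases h : x = 0
      · simp [h]
      · simp [h, ih]
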